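-- pv_equiv track=rewrite | github.com/codigosChidosFunLog/DevLogica | mpp/mpp.py | esta
-- ===== SOURCE A (Python) =====
-- def esta(E1,E2, Base):
-- 	if not Base:
-- 		return False
-- 	else:
-- 		if E1 == Base[0][0]:
-- 			if E2 == Base[0][1]:
-- 				return True
-- 			else:
-- 				return esta(Base[0][1],E2,Base[1:])
-- 		else:
-- 			return esta(E1,E2,Base[1:])
-- ===== SOURCE B (Python) =====
-- def esta(E1, E2, Base):
--     cur = E1
--     found = False
--     for a, b in Base:
--         if not found and cur == a:
--             if b == E2:
--                 found = True
--             else: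
--                 cur = b
--     return found
-- ===== Notes on version B (the rewrite author's own statement) =====
-- stated objective: simpler
-- what changed: Replaces the self-recursive chain walk with repeated list slicing by a single iterative pass maintaining the current endpoint in a mutable variable, with no slicing and no recursion.
import Mathlib
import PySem

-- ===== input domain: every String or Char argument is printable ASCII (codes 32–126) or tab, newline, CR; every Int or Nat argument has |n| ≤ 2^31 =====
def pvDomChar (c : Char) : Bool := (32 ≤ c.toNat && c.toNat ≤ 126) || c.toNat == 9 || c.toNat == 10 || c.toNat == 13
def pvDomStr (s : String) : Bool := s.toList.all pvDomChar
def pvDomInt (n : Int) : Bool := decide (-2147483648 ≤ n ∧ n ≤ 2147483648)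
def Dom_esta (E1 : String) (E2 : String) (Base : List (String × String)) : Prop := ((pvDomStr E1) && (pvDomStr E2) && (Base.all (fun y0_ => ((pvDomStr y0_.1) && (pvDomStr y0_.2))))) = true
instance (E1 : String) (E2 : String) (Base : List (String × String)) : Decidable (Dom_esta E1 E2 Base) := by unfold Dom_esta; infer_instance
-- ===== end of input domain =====

-- B replaces A's slicing recursion by one iterative pass holding the current endpoint; objective: simpler.


-- ===== PORT A =====
-- literal transliteration of A: empty check, head comparison, recursion on the tail Base[1:]
def esta (E1 : String) (E2 : String) (Base : List (String × String)) : Bool :=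
  match Base with
  | [] => false
  | p :: rest =>
    if E1 == p.1 then
      if E2 == p.2 then true
      else esta p.2 E2 rest
    else esta E1 E2 rest

-- ===== PORT B =====
-- one step of Source B's for-loop body over state (cur, found)
def estaStep (E2 : String) (st : String × Bool) (p : String × String) : String × Bool :=
  if !st.2 && st.1 == p.1 then
    if p.2 == E2 then (st.1, true) else (p.2, false)
  else st

-- literal transliteration of B: a fold of the loop body over Base starting from (E1, False), returning found
def esta_alt (E1 : String) (E2 : String) (Base : List (String × String)) : Bool :=
  (Base.foldl (estaStep E2) (E1, false)).2

-- ===== PRECONDITION & SPEC =====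
def Spec_esta (E1 : String) (E2 : String) (Base : List (String × String)) (out : Bool) : Prop := out = esta_alt E1 E2 Base
instance (E1 : String) (E2 : String) (Base : List (String × String)) (out : Bool) : Decidable (Spec_esta E1 E2 Base out) := by unfold Spec_esta; infer_instance

-- ===== CLAIM (what is proved, stated in full; the proofs are below) =====
def Claim_equal_esta : Prop := ∀ (E1 : String) (E2 : String) (Base : List (String × String)), Dom_esta E1 E2 Base → Spec_esta E1 E2 Base (esta E1 E2 Base)

-- ===== LEMMAS AND PROOFS =====

-- once found is true, the fold is inert
theorem foldl_estaStep_true (E2 : String) (l : List (String × String)) (x : String) :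
    l.foldl (estaStep E2) (x, true) = (x, true) := by
  induction l with
  | nil => rfl
  | cons p rest ih => simpa [estaStep] using ih

theorem esta_eq_fold (E2 : String) (l : List (String × String)) :
    ∀ cur : String, esta cur E2 l = (l.foldl (estaStep E2) (cur, false)).2 := by
  induction l with
  | nil => intro cur; rfl
  | cons p rest ih =>
    intro cur
    by_cases h1 : cur == p.1
    · by_cases h2 : E2 == p.2
      · have h2' : p.2 == E2 := by simpa [BEq.comm] using h2
        simp [esta, estaStep, h1, h2, h2', foldl_estaStep_true]
      · have h2' : ¬ (p.2 == E2) = true := by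
          intro h; exact h2 (by simpa [BEq.comm] using h)
        simp [esta, estaStep, h1, h2, h2', ih]
    · simp [esta, estaStep, h1, ih]

-- ===== VERDICT (by name: the statement is the Claim_ definition above) =====
theorem esta_spec : Claim_equal_esta := by
  intro E1 E2 Base _
  unfold Spec_esta esta_alt
  exact esta_eq_fold E2 Base E1
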